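-- pv_equiv track=rewrite | github.com/matthewswain/advent-of-code | 02/main.py | validate_password_2
-- ===== SOURCE A (Python) =====
-- def validate_password_2(policy, password):
--     matches = 0
--
--     for i in range(0, 2):
--         position = policy[i] - 1
--         match = policy[2] == password[position]
--         if match:
--             matches += 1
--
--     return matches == 1
-- ===== SOURCE B (Python) =====
-- def validate_password_2(policy, password):
--     c0 = password[policy[0] - 1]
--     c1 = password[policy[1] - 1]
--     return c0 != c1 and policy[2] in (c0, c1)
-- ===== Notes on version B (the rewrite author's own statement) =====
-- stated objective: alternative
-- what changed: Instead of counting per-position matches and testing count==1, B fetches the two characters first and uses the characterization 'exactly one matches iff the two characters differ and the policy char is among them' (distinctness plus membership).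
import Mathlib
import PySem

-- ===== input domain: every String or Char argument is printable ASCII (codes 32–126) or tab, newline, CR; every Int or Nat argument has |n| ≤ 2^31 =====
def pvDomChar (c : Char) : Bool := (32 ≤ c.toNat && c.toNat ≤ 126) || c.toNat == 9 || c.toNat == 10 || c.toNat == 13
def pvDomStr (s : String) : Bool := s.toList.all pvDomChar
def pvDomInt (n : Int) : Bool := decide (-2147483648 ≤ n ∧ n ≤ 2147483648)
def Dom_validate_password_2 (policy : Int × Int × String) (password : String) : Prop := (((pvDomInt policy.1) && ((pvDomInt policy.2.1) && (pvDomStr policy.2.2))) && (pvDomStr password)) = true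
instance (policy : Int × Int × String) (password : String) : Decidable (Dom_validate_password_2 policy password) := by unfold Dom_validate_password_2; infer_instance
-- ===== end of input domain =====

-- B replaces A's range(2) loop with a match counter (== 1) by a different characterization: fetch both characters, then "the two differ and the policy char is among them" (alternative decomposition, same cost).


-- ===== PORT A =====
-- policy[i] for i in range(0,2): tuple indexing, transliterated as a helper
def pvPolicyIdx (policy : Int × Int × String) (i : Int) : Int :=
  if i = 0 then policy.1 else policy.2.1

def validate_password_2 (policy : Int × Int × String) (password : String) : Bool :=
  -- pyGetD is exact on Pre_ (indices in range); Pre_ excludes the IndexError inputs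
  let cnt0 : Int :=
    (PySem.List.pyRange 0 2 1).foldl (fun cnt i =>
      let position := pvPolicyIdx policy i - 1
      let mtch := policy.2.2 == String.ofList [PySem.List.pyGetD password.toList position ' ']
      if mtch then cnt + 1 else cnt) 0
  cnt0 == 1

-- ===== PORT B =====
def validate_password_2_alt (policy : Int × Int × String) (password : String) : Bool :=
  let c0 := String.ofList [PySem.List.pyGetD password.toList (policy.1 - 1) ' ']
  let c1 := String.ofList [PySem.List.pyGetD password.toList (policy.2.1 - 1) ' ']
  (c0 != c1) && (policy.2.2 == c0 || policy.2.2 == c1)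

-- ===== PRECONDITION & SPEC =====
-- Pre_ excludes exactly the inputs where Python A raises IndexError (a position out of range)
def Pre_validate_password_2 (policy : Int × Int × String) (password : String) : Prop :=
  PySem.Raise.InRange password.toList.length (policy.1 - 1) ∧
  PySem.Raise.InRange password.toList.length (policy.2.1 - 1)
instance (policy : Int × Int × String) (password : String) : Decidable (Pre_validate_password_2 policy password) := by unfold Pre_validate_password_2; infer_instance

def pvWitness_validate_password_2 : (Int × Int × String) × String := ((1, 3, "a"), "abc")

def Spec_validate_password_2 (policy : Int × Int × String) (password : String) (out : Bool) : Prop := out = validate_password_2_alt policy password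
instance (policy : Int × Int × String) (password : String) (out : Bool) : Decidable (Spec_validate_password_2 policy password out) := by unfold Spec_validate_password_2; infer_instance

-- ===== CLAIM (what is proved, stated in full; the proofs are below) =====
def Claim_equal_validate_password_2 : Prop := ∀ (policy : Int × Int × String) (password : String), Dom_validate_password_2 policy password → Pre_validate_password_2 policy password → Spec_validate_password_2 policy password (validate_password_2 policy password)

-- ===== LEMMAS AND PROOFS =====
-- "exactly one of two positions matches" equals "the two characters differ and the policy char is among them"
-- ===== VERDICT (by name: the statement is the Claim_ definition above) =====
theorem validate_password_2_spec : Claim_equal_validate_password_2 := by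
  intro policy password _ _
  unfold Spec_validate_password_2 validate_password_2 validate_password_2_alt
  have hr : PySem.List.pyRange 0 2 1 = [0, 1] := by decide
  rw [hr]
  simp only [List.foldl, pvPolicyIdx]
  norm_num
  generalize policy.2.2 = x
  generalize String.ofList [PySem.List.pyGetD password.toList (policy.1 - 1) ' '] = c0
  generalize String.ofList [PySem.List.pyGetD password.toList (policy.2.1 - 1) ' '] = c1
  by_cases h0 : x = c0
  · subst h0
    by_cases h1 : x = c1
    · subst h1; simp
    · simp [h1, bne]
  · by_cases h1 : x = c1
    · subst h1
      simp [h0, Ne.symm h0, bne]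
    · by_cases he : c0 = c1 <;> simp [h0, h1, he]
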